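-- pv_equiv track=rewrite | github.com/betrusted-io/xous-core | tools/pddbcommon.py | mm3_hash
-- ===== SOURCE A (Python) =====
-- def xrange( a, b, c ):
--     return range( a, b, c )
--
-- def xencode(x):
--     if isinstance(x, bytes) or isinstance(x, bytearray):
--         return x
--     else:
--         return x.encode()
--
-- def mm3_hash( key, seed = 0x0 ):
--     ''' Implements 32bit murmur3 hash. '''
--
--     key = bytearray( xencode(key) )
--
--     def fmix( h ):
--         h ^= h >> 16
--         h  = ( h * 0x85ebca6b ) & 0xFFFFFFFF
--         h ^= h >> 13
--         h  = ( h * 0xc2b2ae35 ) & 0xFFFFFFFF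
--         h ^= h >> 16
--         return h
--
--     length = len( key )
--     nblocks = int( length / 4 )
--
--     h1 = seed
--
--     c1 = 0xcc9e2d51
--     c2 = 0x1b873593
--
--     # body
--     for block_start in xrange( 0, nblocks * 4, 4 ):
--         # ??? big endian?
--         k1 = key[ block_start + 3 ] << 24 | \
--              key[ block_start + 2 ] << 16 | \
--              key[ block_start + 1 ] <<  8 | \
--              key[ block_start + 0 ]
--
--         k1 = ( c1 * k1 ) & 0xFFFFFFFF
--         k1 = ( k1 << 15 | k1 >> 17 ) & 0xFFFFFFFF # inlined ROTL32
--         k1 = ( c2 * k1 ) & 0xFFFFFFFF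
--
--         h1 ^= k1
--         h1  = ( h1 << 13 | h1 >> 19 ) & 0xFFFFFFFF # inlined ROTL32
--         h1  = ( h1 * 5 + 0xe6546b64 ) & 0xFFFFFFFF
--
--     # tail
--     tail_index = nblocks * 4
--     k1 = 0
--     tail_size = length & 3
--
--     if tail_size >= 3:
--         k1 ^= key[ tail_index + 2 ] << 16
--     if tail_size >= 2:
--         k1 ^= key[ tail_index + 1 ] << 8
--     if tail_size >= 1:
--         k1 ^= key[ tail_index + 0 ]
--
--     if tail_size > 0:
--         k1  = ( k1 * c1 ) & 0xFFFFFFFF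
--         k1  = ( k1 << 15 | k1 >> 17 ) & 0xFFFFFFFF # inlined ROTL32
--         k1  = ( k1 * c2 ) & 0xFFFFFFFF
--         h1 ^= k1
--
--     #finalization
--     return fmix( h1 ^ length )
--
--     # weird, this code breaks things compared to the reference Rust implementation
--     unsigned_val = fmix( h1 ^ length )
--     if unsigned_val & 0x80000000 == 0:
--         return unsigned_val
--     else:
--         return -( (unsigned_val ^ 0xFFFFFFFF) + 1 )
-- ===== SOURCE B (Python) =====
-- def _mix_k(k1):
--     k1 = (k1 * 0xcc9e2d51) & 0xFFFFFFFF
--     k1 = (k1 << 15 | k1 >> 17) & 0xFFFFFFFF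
--     k1 = (k1 * 0x1b873593) & 0xFFFFFFFF
--     return k1
--
-- def _fmix(h):
--     h ^= h >> 16
--     h = (h * 0x85ebca6b) & 0xFFFFFFFF
--     h ^= h >> 13
--     h = (h * 0xc2b2ae35) & 0xFFFFFFFF
--     h ^= h >> 16
--     return h
--
-- def mm3_hash(key, seed=0x0):
--     ''' 32bit murmur3, streaming: one uniform pass over the bytes. '''
--     if isinstance(key, (bytes, bytearray)):
--         data = bytes(key)
--     else:
--         data = key.encode()
--     h1 = seed
--     acc = 0
--     filled = 0
--     for byte in data:
--         acc ^= byte << (8 * filled)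
--         filled += 1
--         if filled == 4:
--             h1 ^= _mix_k(acc)
--             h1 = (h1 << 13 | h1 >> 19) & 0xFFFFFFFF
--             h1 = (h1 * 5 + 0xe6546b64) & 0xFFFFFFFF
--             acc = 0
--             filled = 0
--     if filled > 0:
--         h1 ^= _mix_k(acc)
--     return _fmix(h1 ^ len(data))
-- ===== Notes on version B (the rewrite author's own statement) =====
-- stated objective: alternative
-- what changed: Replaces A's block-index loop (range over 4-byte block starts with explicit little-endian indexing plus a cascade of tail ifs) by a single streaming pass that XOR-shifts each byte into a 4-byte accumulator and fires the block mix every fourth byte, with the leftover accumulator mixed as the tail.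
import Mathlib
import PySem

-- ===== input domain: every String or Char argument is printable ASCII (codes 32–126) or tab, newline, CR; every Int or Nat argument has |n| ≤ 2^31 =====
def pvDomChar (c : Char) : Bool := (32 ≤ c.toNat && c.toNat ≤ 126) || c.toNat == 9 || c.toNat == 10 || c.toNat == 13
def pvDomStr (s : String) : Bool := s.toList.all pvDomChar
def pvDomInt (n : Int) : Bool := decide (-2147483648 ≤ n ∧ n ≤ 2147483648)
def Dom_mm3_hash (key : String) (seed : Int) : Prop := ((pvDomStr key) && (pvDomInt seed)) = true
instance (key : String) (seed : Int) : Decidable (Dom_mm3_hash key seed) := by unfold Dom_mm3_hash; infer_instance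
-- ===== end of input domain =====

-- B replaces A's 4-byte-block index loop + cascaded tail ifs by one streaming byte pass
-- with an accumulator (a genuinely different decomposition; similar cost).

-- ===== PORT A =====
-- A's nested helper fmix, transliterated.
def mm3FmixA (h : Int) : Int :=
  let h := PySem.Int.bxor h (h >>> (16 : Nat))
  let h := PySem.Int.band (h * 0x85ebca6b) 0xFFFFFFFF
  let h := PySem.Int.bxor h (h >>> (13 : Nat))
  let h := PySem.Int.band (h * 0xc2b2ae35) 0xFFFFFFFF
  PySem.Int.bxor h (h >>> (16 : Nat))

-- body of A's 'for block_start in xrange(0, nblocks*4, 4)' loop, step for step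
-- (key[..] is always in range here, so the total pyGetD is exact).
def mm3BodyA (keyB : List Int) (h1 block_start : Int) : Int :=
  let k1 : Int :=
    PySem.Int.bor (PySem.Int.bor (PySem.Int.bor
      ((PySem.List.pyGetD keyB (block_start + 3) 0) <<< (24 : Nat))
      ((PySem.List.pyGetD keyB (block_start + 2) 0) <<< (16 : Nat)))
      ((PySem.List.pyGetD keyB (block_start + 1) 0) <<< (8 : Nat)))
      (PySem.List.pyGetD keyB (block_start + 0) 0)
  let k1 := PySem.Int.band (0xcc9e2d51 * k1) 0xFFFFFFFF
  let k1 := PySem.Int.band (PySem.Int.bor (k1 <<< (15 : Nat)) (k1 >>> (17 : Nat))) 0xFFFFFFFF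
  let k1 := PySem.Int.band (0x1b873593 * k1) 0xFFFFFFFF
  let h1 := PySem.Int.bxor h1 k1
  let h1 := PySem.Int.band (PySem.Int.bor (h1 <<< (13 : Nat)) (h1 >>> (19 : Nat))) 0xFFFFFFFF
  PySem.Int.band (h1 * 5 + 0xe6546b64) 0xFFFFFFFF

def mm3_hash (key : String) (seed : Int) : Int :=
  -- bytearray(xencode(key)): UTF-8 bytes = the code points on the ASCII domain Dom
  let keyB : List Int := key.toList.map (fun c => (c.toNat : Int))
  let length : Int := PySem.List.len keyB
  let nblocks : Int := PySem.Int.floordiv length 4  -- int(length/4): exact, length ≥ 0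
  let h1 : Int := (PySem.List.pyRange 0 (nblocks * 4) 4).foldl (mm3BodyA keyB) seed
  let tail_index : Int := nblocks * 4
  let k1 : Int := 0
  let tail_size : Int := PySem.Int.band length 3
  let k1 := if tail_size ≥ 3 then PySem.Int.bxor k1 ((PySem.List.pyGetD keyB (tail_index + 2) 0) <<< (16 : Nat)) else k1
  let k1 := if tail_size ≥ 2 then PySem.Int.bxor k1 ((PySem.List.pyGetD keyB (tail_index + 1) 0) <<< (8 : Nat)) else k1
  let k1 := if tail_size ≥ 1 then PySem.Int.bxor k1 (PySem.List.pyGetD keyB (tail_index + 0) 0) else k1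
  let h1 := if tail_size > 0 then
      let k1 := PySem.Int.band (k1 * 0xcc9e2d51) 0xFFFFFFFF
      let k1 := PySem.Int.band (PySem.Int.bor (k1 <<< (15 : Nat)) (k1 >>> (17 : Nat))) 0xFFFFFFFF
      let k1 := PySem.Int.band (k1 * 0x1b873593) 0xFFFFFFFF
      PySem.Int.bxor h1 k1
    else h1
  mm3FmixA (PySem.Int.bxor h1 length)

-- ===== PORT B =====
-- Source B's _mix_k.
def mm3MixK (k1 : Int) : Int :=
  let k1 := PySem.Int.band (k1 * 0xcc9e2d51) 0xFFFFFFFF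
  let k1 := PySem.Int.band (PySem.Int.bor (k1 <<< (15 : Nat)) (k1 >>> (17 : Nat))) 0xFFFFFFFF
  PySem.Int.band (k1 * 0x1b873593) 0xFFFFFFFF

-- Source B's _fmix.
def mm3Fmix (h : Int) : Int :=
  let h := PySem.Int.bxor h (h >>> (16 : Nat))
  let h := PySem.Int.band (h * 0x85ebca6b) 0xFFFFFFFF
  let h := PySem.Int.bxor h (h >>> (13 : Nat))
  let h := PySem.Int.band (h * 0xc2b2ae35) 0xFFFFFFFF
  PySem.Int.bxor h (h >>> (16 : Nat))

-- body of Source B's 'for byte in data' loop: state (h1, acc, filled).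
def mm3Step (st : Int × Int × Nat) (byte : Int) : Int × Int × Nat :=
  let acc := PySem.Int.bxor st.2.1 (byte <<< (8 * st.2.2))
  let filled := st.2.2 + 1
  if filled = 4 then
    let h1 := PySem.Int.bxor st.1 (mm3MixK acc)
    let h1 := PySem.Int.band (PySem.Int.bor (h1 <<< (13 : Nat)) (h1 >>> (19 : Nat))) 0xFFFFFFFF
    let h1 := PySem.Int.band (h1 * 5 + 0xe6546b64) 0xFFFFFFFF
    (h1, 0, 0)
  else (st.1, acc, filled)

def mm3_hash_alt (key : String) (seed : Int) : Int :=
  -- key.encode(): UTF-8 bytes = the code points on the ASCII domain Dom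
  let data : List Int := key.toList.map (fun c => (c.toNat : Int))
  let st := data.foldl mm3Step (seed, 0, 0)
  let h1 := if st.2.2 > 0 then PySem.Int.bxor st.1 (mm3MixK st.2.1) else st.1
  mm3Fmix (PySem.Int.bxor h1 (PySem.List.len data))

-- ===== PRECONDITION & SPEC =====
def Spec_mm3_hash (key : String) (seed : Int) (out : Int) : Prop := out = mm3_hash_alt key seed
instance (key : String) (seed : Int) (out : Int) : Decidable (Spec_mm3_hash key seed out) := by unfold Spec_mm3_hash; infer_instance

-- ===== CLAIM (what is proved, stated in full; the proofs are below) =====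
def Claim_equal_mm3_hash : Prop := ∀ (key : String) (seed : Int), Dom_mm3_hash key seed → Spec_mm3_hash key seed (mm3_hash key seed)

-- ===== LEMMAS AND PROOFS =====

theorem or_disj : ∀ (k x b : Nat), 2^k ∣ x → b < 2^k → x ||| b = x + b := by
  intro k
  induction k with
  | zero => intro x b _ hb; interval_cases b; simp
  | succ k ih =>
    intro x b hx hb
    have hx2 : x % 2 = 0 := by
      have : (2:Nat) ∣ x := dvd_trans (dvd_pow_self 2 (Nat.succ_ne_zero k)) hx; omega
    have hxd : 2^k ∣ x / 2 := by
      obtain ⟨c, rfl⟩ := hx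
      have e : 2^(k+1)*c = 2*(2^k*c) := by ring
      rw [e, Nat.mul_div_cancel_left _ (by norm_num : (0:Nat) < 2)]
      exact ⟨c, rfl⟩
    have hbd : b / 2 < 2^k := by rw [pow_succ] at hb; omega
    have h1 : x = Nat.bit false (x / 2) := by simp [Nat.bit]; omega
    have h2 : b = Nat.bit (b % 2 = 1) (b / 2) := by by_cases h : b % 2 = 1 <;> simp [Nat.bit, h] <;> omega
    rw [h1, h2, Nat.lor_bit, ih _ _ hxd hbd]
    by_cases h : b % 2 = 1 <;> simp [Nat.bit, h] <;> omega

theorem xor_disj : ∀ (k x b : Nat), 2^k ∣ x → b < 2^k → x ^^^ b = x + b := by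
  intro k
  induction k with
  | zero => intro x b _ hb; interval_cases b; simp
  | succ k ih =>
    intro x b hx hb
    have hx2 : x % 2 = 0 := by
      have : (2:Nat) ∣ x := dvd_trans (dvd_pow_self 2 (Nat.succ_ne_zero k)) hx; omega
    have hxd : 2^k ∣ x / 2 := by
      obtain ⟨c, rfl⟩ := hx
      have e : 2^(k+1)*c = 2*(2^k*c) := by ring
      rw [e, Nat.mul_div_cancel_left _ (by norm_num : (0:Nat) < 2)]
      exact ⟨c, rfl⟩
    have hbd : b / 2 < 2^k := by rw [pow_succ] at hb; omega
    have h1 : x = Nat.bit false (x / 2) := by simp [Nat.bit]; omega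
    have h2 : b = Nat.bit (b % 2 = 1) (b / 2) := by by_cases h : b % 2 = 1 <;> simp [Nat.bit, h] <;> omega
    rw [h1, h2, Nat.xor_bit, ih _ _ hxd hbd]
    by_cases h : b % 2 = 1 <;> simp [Nat.bit, h] <;> omega

theorem int_shiftLeft_natCast (m k : Nat) : ((m : Int) <<< k) = ((m <<< k : Nat) : Int) := rfl

-- the 32-bit little-endian pack exactly as A's body writes it
def mm3Pack (b0 b1 b2 b3 : Int) : Int :=
  PySem.Int.bor (PySem.Int.bor (PySem.Int.bor (b3 <<< (24 : Nat)) (b2 <<< (16 : Nat))) (b1 <<< (8 : Nat))) b0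

-- one full-block update of h1, shared shape of both programs
def mm3Blk (h k : Int) : Int :=
  let h1 := PySem.Int.bxor h (mm3MixK k)
  let h1 := PySem.Int.band (PySem.Int.bor (h1 <<< (13 : Nat)) (h1 >>> (19 : Nat))) 0xFFFFFFFF
  PySem.Int.band (h1 * 5 + 0xe6546b64) 0xFFFFFFFF

-- reference chunked recursion: process 4-byte blocks, return (h1, leftover tail)
def mm3Spec : Int → List Int → Int × List Int
  | h, b0 :: b1 :: b2 :: b3 :: rest => mm3Spec (mm3Blk h (mm3Pack b0 b1 b2 b3)) rest
  | h, rest => (h, rest)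

theorem chunk_ind (P : List Int → Prop)
    (short : ∀ l, l.length < 4 → P l)
    (step : ∀ b0 b1 b2 b3 rest, P rest → P (b0 :: b1 :: b2 :: b3 :: rest)) :
    ∀ l, P l := by
  intro l
  generalize hn : l.length = n
  induction n using Nat.strong_induction_on generalizing l with
  | _ n ih =>
    match l, hn with
    | [], hn => exact short _ (by simp)
    | [a], hn => exact short _ (by simp)
    | [a,b], hn => exact short _ (by simp)
    | [a,b,c], hn => exact short _ (by simp)
    | b0 :: b1 :: b2 :: b3 :: rest, hn =>
      exact step _ _ _ _ _ (ih rest.length (by simp at hn; omega) rest rfl)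

theorem mm3Spec_short (h : Int) (l : List Int) (hl : l.length < 4) : mm3Spec h l = (h, l) := by
  match l, hl with
  | [], _ => rfl
  | [a], _ => rfl
  | [a,b], _ => rfl
  | [a,b,c], _ => rfl

theorem mm3Spec_snd_drop : ∀ (l : List Int) (h : Int), (mm3Spec h l).2 = l.drop (4 * (l.length / 4)) := by
  have := chunk_ind (fun l => ∀ h : Int, (mm3Spec h l).2 = l.drop (4 * (l.length / 4)))
    (by intro l hl h
        rw [mm3Spec_short h l hl]
        have : l.length / 4 = 0 := by omega
        simp [this])
    (by intro b0 b1 b2 b3 rest ih h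
        show (mm3Spec (mm3Blk h (mm3Pack b0 b1 b2 b3)) rest).2 = _
        rw [ih]
        have e : (b0 :: b1 :: b2 :: b3 :: rest).length = rest.length + 4 := by simp
        rw [e]
        have e2 : 4 * ((rest.length + 4) / 4) = 4 * (rest.length / 4) + 4 := by omega
        rw [e2]
        rfl)
  intro l h; exact this l h

theorem pyGetD_4cons (b0 b1 b2 b3 : Int) (l : List Int) (i : Int) (hi : 0 ≤ i) :
    PySem.List.pyGetD (b0 :: b1 :: b2 :: b3 :: l) (i + 4) 0 = PySem.List.pyGetD l i 0 := by
  obtain ⟨m, rfl⟩ := Int.eq_ofNat_of_zero_le hi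
  have e : ((m : Int) + 4) = ((m + 4 : Nat) : Int) := by push_cast; ring
  rw [e, PySem.List.pyGetD_natCast, PySem.List.pyGetD_natCast]
  rfl

theorem bodyA_shift (b0 b1 b2 b3 : Int) (l : List Int) (h : Int) (k : Nat) :
    mm3BodyA (b0 :: b1 :: b2 :: b3 :: l) h (4 * ((k : Int) + 1)) = mm3BodyA l h (4 * (k : Int)) := by
  unfold mm3BodyA
  have e0 : (4:Int) * ((k:Int)+1) + 0 = (4 * (k:Int) + 0) + 4 := by ring
  have e1 : (4:Int) * ((k:Int)+1) + 1 = (4 * (k:Int) + 1) + 4 := by ring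
  have e2 : (4:Int) * ((k:Int)+1) + 2 = (4 * (k:Int) + 2) + 4 := by ring
  have e3 : (4:Int) * ((k:Int)+1) + 3 = (4 * (k:Int) + 3) + 4 := by ring
  rw [e0, e1, e2, e3,
      pyGetD_4cons b0 b1 b2 b3 l _ (by positivity),
      pyGetD_4cons b0 b1 b2 b3 l _ (by positivity),
      pyGetD_4cons b0 b1 b2 b3 l _ (by positivity),
      pyGetD_4cons b0 b1 b2 b3 l _ (by positivity)]

theorem bodyA_zero (b0 b1 b2 b3 : Int) (l : List Int) (h : Int) :
    mm3BodyA (b0 :: b1 :: b2 :: b3 :: l) h 0 = mm3Blk h (mm3Pack b0 b1 b2 b3) := by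
  unfold mm3BodyA mm3Blk mm3MixK mm3Pack
  norm_num [PySem.List.pyGetD_ofNat' , Int.mul_comm]

theorem pyRange4 (q : Nat) :
    PySem.List.pyRange 0 ((q : Int) * 4) 4 = (List.range q).map (fun (k : Nat) => (4 : Int) * (k : Int)) := by
  rw [PySem.List.pyRange_of_pos 0 _ (by norm_num : (0:Int) < 4)]
  rcases Nat.eq_zero_or_pos q with h | h
  · subst h; norm_num
  · have hlt : (0:Int) < (q:Int) * 4 := by positivity
    rw [if_pos hlt]
    have e : (((q:Int) * 4 - 0 + 4 - 1) / 4).toNat = q := by omega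
    rw [e]
    apply List.map_congr_left
    intro k _
    ring

theorem A_loop : ∀ (l : List Int) (h : Int),
    (List.range (l.length / 4)).foldl (fun (h : Int) (k : Nat) => mm3BodyA l h (4 * (k : Int))) h = (mm3Spec h l).1 := by
  have main := chunk_ind (fun l => ∀ h : Int,
      (List.range (l.length / 4)).foldl (fun (h : Int) (k : Nat) => mm3BodyA l h (4 * (k : Int))) h = (mm3Spec h l).1)
    (by intro l hl h
        have : l.length / 4 = 0 := by omega
        rw [this, mm3Spec_short h l hl]
        rfl)
    (by intro b0 b1 b2 b3 rest ih h
        have e : (b0 :: b1 :: b2 :: b3 :: rest).length / 4 = rest.length / 4 + 1 := by simp; omega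
        rw [e]
        simp only [List.range_succ_eq_map, List.foldl_cons, List.foldl_map]
        have hz : mm3BodyA (b0::b1::b2::b3::rest) h (4 * ((0:Nat):Int)) = mm3Blk h (mm3Pack b0 b1 b2 b3) := by
          rw [show (4:Int) * ((0:Nat):Int) = 0 by norm_num]; exact bodyA_zero _ _ _ _ _ _
        rw [hz]
        have hfg : ∀ (acc : Int), ∀ x ∈ List.range (rest.length / 4),
            mm3BodyA (b0::b1::b2::b3::rest) acc (4 * ((Nat.succ x : Nat) : Int)) = mm3BodyA rest acc (4 * (x : Int)) := by
          intro acc x _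
          have hx : ((Nat.succ x : Nat) : Int) = (x : Int) + 1 := by push_cast; ring
          rw [hx]
          exact bodyA_shift _ _ _ _ _ _ _
        rw [PySem.List.foldl_congr_mem (List.range (rest.length / 4)) _ _ _ hfg, ih]
        rfl)
  exact main

-- B's leftover accumulator after 0..3 streamed bytes
def leftAcc : List Int → Int
  | [] => 0
  | [a] => PySem.Int.bxor 0 (a <<< (0 : Nat))
  | [a, b] => PySem.Int.bxor (PySem.Int.bxor 0 (a <<< (0 : Nat))) (b <<< (8 : Nat))
  | [a, b, c] => PySem.Int.bxor (PySem.Int.bxor (PySem.Int.bxor 0 (a <<< (0 : Nat))) (b <<< (8 : Nat))) (c <<< (16 : Nat))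
  | _ => 0

def IsByte (b : Int) : Prop := ∃ m : Nat, b = (m : Int) ∧ m < 256

theorem pack_eq (m0 m1 m2 m3 : Nat) (h0 : m0 < 256) (h1 : m1 < 256) (h2 : m2 < 256) :
    PySem.Int.bxor (PySem.Int.bxor (PySem.Int.bxor (PySem.Int.bxor 0 ((m0:Int)))
      (((m1:Int)) <<< (8 : Nat))) (((m2:Int)) <<< (16 : Nat))) (((m3:Int)) <<< (24 : Nat))
    = mm3Pack (m0:Int) (m1:Int) (m2:Int) (m3:Int) := by
  unfold mm3Pack
  have z : (0:Int) = ((0:Nat):Int) := rfl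
  rw [z, int_shiftLeft_natCast, int_shiftLeft_natCast, int_shiftLeft_natCast,
      PySem.Int.bxor_natCast, PySem.Int.bxor_natCast, PySem.Int.bxor_natCast, PySem.Int.bxor_natCast,
      PySem.Int.bor_natCast, PySem.Int.bor_natCast, PySem.Int.bor_natCast]
  congr 1
  simp only [Nat.shiftLeft_eq, Nat.zero_xor]
  norm_num
  have d1 : m1 * 256 ^^^ m2 * 65536 = m2 * 65536 ^^^ m1 * 256 := Nat.xor_comm _ _
  -- B chain
  have b1 : m0 ^^^ m1 * 256 = m1 * 256 + m0 := by
    rw [Nat.xor_comm]; exact xor_disj 8 _ _ ⟨m1, by ring⟩ (by omega)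
  have b2 : (m1 * 256 + m0) ^^^ m2 * 65536 = m2 * 65536 + (m1 * 256 + m0) := by
    rw [Nat.xor_comm]; exact xor_disj 16 _ _ ⟨m2, by ring⟩ (by omega)
  have b3 : (m2 * 65536 + (m1 * 256 + m0)) ^^^ m3 * 16777216 = m3 * 16777216 + (m2 * 65536 + (m1 * 256 + m0)) := by
    rw [Nat.xor_comm]; exact xor_disj 24 _ _ ⟨m3, by ring⟩ (by omega)
  -- A chain
  have a1 : m3 * 16777216 ||| m2 * 65536 = m3 * 16777216 + m2 * 65536 :=
    or_disj 24 _ _ ⟨m3, by ring⟩ (by omega)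
  have a2 : (m3 * 16777216 + m2 * 65536) ||| m1 * 256 = (m3 * 16777216 + m2 * 65536) + m1 * 256 :=
    or_disj 16 _ _ ⟨m3 * 256 + m2, by ring⟩ (by omega)
  have a3 : ((m3 * 16777216 + m2 * 65536) + m1 * 256) ||| m0 = ((m3 * 16777216 + m2 * 65536) + m1 * 256) + m0 :=
    or_disj 8 _ _ ⟨m3 * 65536 + m2 * 256 + m1, by ring⟩ (by omega)
  rw [b1, b2, b3, a1, a2, a3]
  ring

theorem B_loop : ∀ (l : List Int), (∀ b ∈ l, IsByte b) → ∀ h : Int,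
    l.foldl mm3Step (h, 0, 0) = ((mm3Spec h l).1, leftAcc (mm3Spec h l).2, (mm3Spec h l).2.length) := by
  have main := chunk_ind (fun l => (∀ b ∈ l, IsByte b) → ∀ h : Int,
      l.foldl mm3Step (h, 0, 0) = ((mm3Spec h l).1, leftAcc (mm3Spec h l).2, (mm3Spec h l).2.length))
    (by intro l hl hb h
        rw [mm3Spec_short h l hl]
        match l, hl with
        | [], _ => rfl
        | [a], _ => simp [mm3Step, leftAcc]
        | [a,b], _ => simp [mm3Step, leftAcc]
        | [a,b,c], _ => simp [mm3Step, leftAcc])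
    (by intro b0 b1 b2 b3 rest ih hb h
        obtain ⟨m0, rfl, hm0⟩ := hb b0 (by simp)
        obtain ⟨m1, rfl, hm1⟩ := hb b1 (by simp)
        obtain ⟨m2, rfl, hm2⟩ := hb b2 (by simp)
        obtain ⟨m3, rfl, hm3⟩ := hb b3 (by simp)
        have hrest : ∀ b ∈ rest, IsByte b := fun b hbm => hb b (by simp [hbm])
        have e4 : ((m0:Int) :: (m1:Int) :: (m2:Int) :: (m3:Int) :: rest).foldl mm3Step (h, 0, 0)
            = rest.foldl mm3Step (mm3Blk h (mm3Pack m0 m1 m2 m3), 0, 0) := by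
          have hstep4 : mm3Step (mm3Step (mm3Step (mm3Step (h,(0:Int),(0:Nat)) ((m0:Nat):Int)) ((m1:Nat):Int)) ((m2:Nat):Int)) ((m3:Nat):Int)
              = (mm3Blk h (mm3Pack (m0:Int) (m1:Int) (m2:Int) (m3:Int)), (0:Int), (0:Nat)) := by
            simp only [mm3Step]
            norm_num
            rw [pack_eq m0 m1 m2 m3 hm0 hm1 hm2]
            simp [mm3Blk]
          simp only [List.foldl_cons, hstep4]
        rw [e4, ih hrest]
        rfl)
  intro l hb h; exact main l hb h

-- A's tail xor-chain equals B's leftover accumulator (0..3 bytes, all < 256)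
theorem tail1 (m0 : Nat) :
    PySem.Int.bxor 0 ((m0:Int)) = leftAcc [(m0:Int)] := by
  simp [leftAcc]

theorem tail2 (m0 m1 : Nat) :
    PySem.Int.bxor (PySem.Int.bxor 0 (((m1:Int)) <<< (8 : Nat))) ((m0:Int))
      = leftAcc [(m0:Int), (m1:Int)] := by
  simp only [leftAcc]
  have z : (0:Int) = ((0:Nat):Int) := rfl
  rw [z, int_shiftLeft_natCast, int_shiftLeft_natCast,
      PySem.Int.bxor_natCast, PySem.Int.bxor_natCast, PySem.Int.bxor_natCast, PySem.Int.bxor_natCast]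
  congr 1
  simp only [Nat.shiftLeft_eq, Nat.zero_xor]
  norm_num
  rw [Nat.xor_comm m0 (m1 * 256)]

theorem tail3 (m0 m1 m2 : Nat) (h0 : m0 < 256) (h1 : m1 < 256) :
    PySem.Int.bxor (PySem.Int.bxor (PySem.Int.bxor 0 (((m2:Int)) <<< (16 : Nat))) (((m1:Int)) <<< (8 : Nat))) ((m0:Int))
      = leftAcc [(m0:Int), (m1:Int), (m2:Int)] := by
  simp only [leftAcc]
  have z : (0:Int) = ((0:Nat):Int) := rfl
  rw [z, int_shiftLeft_natCast, int_shiftLeft_natCast, int_shiftLeft_natCast,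
      PySem.Int.bxor_natCast, PySem.Int.bxor_natCast, PySem.Int.bxor_natCast,
      PySem.Int.bxor_natCast, PySem.Int.bxor_natCast, PySem.Int.bxor_natCast]
  congr 1
  simp only [Nat.shiftLeft_eq, Nat.zero_xor]
  norm_num
  have a1 : m2 * 65536 ^^^ m1 * 256 = m2 * 65536 + m1 * 256 :=
    xor_disj 16 _ _ ⟨m2, by ring⟩ (by omega)
  have a2 : (m2 * 65536 + m1 * 256) ^^^ m0 = (m2 * 65536 + m1 * 256) + m0 :=
    xor_disj 8 _ _ ⟨m2 * 256 + m1, by ring⟩ (by omega)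
  have b1 : m0 ^^^ m1 * 256 = m1 * 256 + m0 := by
    rw [Nat.xor_comm]; exact xor_disj 8 _ _ ⟨m1, by ring⟩ (by omega)
  have b2 : (m1 * 256 + m0) ^^^ m2 * 65536 = m2 * 65536 + (m1 * 256 + m0) := by
    rw [Nat.xor_comm]; exact xor_disj 16 _ _ ⟨m2, by ring⟩ (by omega)
  rw [a1, a2, b1, b2]
  ring

-- ===== VERDICT (by name: the statement is the Claim_ definition above) =====
theorem mm3_hash_spec : Claim_equal_mm3_hash := by
  intro key seed hdom
  unfold Spec_mm3_hash
  show mm3_hash key seed = mm3_hash_alt key seed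
  simp only [mm3_hash, mm3_hash_alt, PySem.List.len_eq]
  set l : List Int := key.toList.map (fun c => (c.toNat : Int)) with hldef
  have hbytes : ∀ b ∈ l, IsByte b := by
    intro b hb
    rw [hldef] at hb
    simp only [List.mem_map] at hb
    obtain ⟨c, hc, rfl⟩ := hb
    refine ⟨c.toNat, rfl, ?_⟩
    unfold Dom_mm3_hash pvDomStr pvDomChar at hdom
    simp only [Bool.and_eq_true, List.all_eq_true] at hdom
    have h := hdom.1 c hc
    simp only [Bool.or_eq_true, Bool.and_eq_true, decide_eq_true_eq, beq_iff_eq] at h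
    omega
  have hq : PySem.Int.floordiv ((l.length : Nat) : Int) 4 = ((l.length / 4 : Nat) : Int) := by
    rw [PySem.Int.floordiv_eq_ediv_of_pos (by norm_num)]
    omega
  have hts : PySem.Int.band ((l.length : Nat) : Int) 3 = ((l.length % 4 : Nat) : Int) := by
    rw [show (3:Int) = ((3:Nat):Int) from rfl, PySem.Int.band_natCast,
        Nat.and_two_pow_sub_one_eq_mod l.length 2]
  rw [hq, hts, pyRange4]
  simp only [List.foldl_map]
  rw [A_loop l seed, B_loop l hbytes seed, mm3Spec_snd_drop l seed]
  set H := (mm3Spec seed l).1 with hHdef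
  set t := l.drop (4 * (l.length / 4)) with htdef
  have hr : t.length = l.length % 4 := by
    rw [htdef, List.length_drop]
    omega
  have hidx : ∀ j : Nat, j < t.length →
      PySem.List.pyGetD l (((l.length / 4 : Nat) : Int) * 4 + (j : Int)) 0 = t.getD j 0 := by
    intro j hj
    have e : (((l.length / 4 : Nat) : Int) * 4 + (j : Int)) = ((4 * (l.length / 4) + j : Nat) : Int) := by
      push_cast; ring
    rw [e, PySem.List.pyGetD_natCast, htdef]
    simp [List.getD, List.getElem?_drop]
  have hr4 : l.length % 4 = 0 ∨ l.length % 4 = 1 ∨ l.length % 4 = 2 ∨ l.length % 4 = 3 := by omega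
  rcases hr4 with hc | hc | hc | hc <;> rw [hc] at hr ⊢
  · -- no tail
    rw [hr]
    norm_num
    rfl
  · -- 1-byte tail
    obtain ⟨a, ha⟩ := List.length_eq_one_iff.mp hr
    obtain ⟨m0, rfl, hm0⟩ := hbytes a (by
      have : a ∈ t := by rw [ha]; simp
      exact List.drop_subset _ _ this)
    rw [hr, ha]
    have h0 := hidx 0 (by rw [hr]; omega)
    rw [show ((0:Nat):Int) = (0:Int) from rfl] at h0
    rw [ha] at h0
    norm_num at h0 ⊢
    rw [h0, tail1 m0]
    rfl
  · -- 2-byte tail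
    obtain ⟨a, b, ha⟩ := List.length_eq_two.mp hr
    obtain ⟨m0, rfl, hm0⟩ := hbytes a (by
      have : a ∈ t := by rw [ha]; simp
      exact List.drop_subset _ _ this)
    obtain ⟨m1, rfl, hm1⟩ := hbytes b (by
      have : b ∈ t := by rw [ha]; simp
      exact List.drop_subset _ _ this)
    rw [hr, ha]
    have h0 := hidx 0 (by rw [hr]; omega)
    have h1 := hidx 1 (by rw [hr]; omega)
    rw [show ((0:Nat):Int) = (0:Int) from rfl] at h0
    rw [ha] at h0 h1
    norm_num at h0 h1 ⊢
    rw [h0, h1, tail2 m0 m1]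
    rfl
  · -- 3-byte tail
    obtain ⟨a, b, c, ha⟩ := List.length_eq_three.mp hr
    obtain ⟨m0, rfl, hm0⟩ := hbytes a (by
      have : a ∈ t := by rw [ha]; simp
      exact List.drop_subset _ _ this)
    obtain ⟨m1, rfl, hm1⟩ := hbytes b (by
      have : b ∈ t := by rw [ha]; simp
      exact List.drop_subset _ _ this)
    obtain ⟨m2, rfl, hm2⟩ := hbytes c (by
      have : c ∈ t := by rw [ha]; simp
      exact List.drop_subset _ _ this)
    rw [hr, ha]
    have h0 := hidx 0 (by rw [hr]; omega)
    have h1 := hidx 1 (by rw [hr]; omega)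
    have h2 := hidx 2 (by rw [hr]; omega)
    rw [show ((0:Nat):Int) = (0:Int) from rfl] at h0
    rw [ha] at h0 h1 h2
    norm_num at h0 h1 h2 ⊢
    rw [h0, h1, h2, tail3 m0 m1 m2 hm0 hm1]
    rfl
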